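-- pv_equiv track=rewrite | github.com/deep00987/network_lab | dustbin/Additional_Functions.py | Subnet_Generator
-- ===== SOURCE A (Python) =====
-- def Subnet_Generator(Network_Bits):
--     Host_Bits = 32-Network_Bits
--     Host_Octates = Host_Bits//8
--     build = []
--     Net_Octates = Network_Bits//8
--     Network_Bits = Network_Bits%8
--     Limit = 7
--     build += [255]*Net_Octates
--     if Network_Bits != 0:
--         S = 0
--         while True:
--             if Network_Bits != 0:
--                 S += 2**(Limit)
--                 Network_Bits -= 1
--                 Limit -= 1
--             else:
--                 break
--         build.append(S)
--     build += [0]*Host_Octates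
--     return build
-- ===== SOURCE B (Python) =====
-- def Subnet_Generator(Network_Bits):
--     rem = Network_Bits % 8
--     mid = [] if rem == 0 else [256 - 2 ** (8 - rem)]
--     return [255] * (Network_Bits // 8) + mid + [0] * ((32 - Network_Bits) // 8)
-- ===== Notes on version B (the rewrite author's own statement) =====
-- stated objective: simpler
-- what changed: The bit-by-bit while loop accumulating the partial octet is replaced by a closed-form power-of-two expression, and the list is assembled in one expression.
import Mathlib
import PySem

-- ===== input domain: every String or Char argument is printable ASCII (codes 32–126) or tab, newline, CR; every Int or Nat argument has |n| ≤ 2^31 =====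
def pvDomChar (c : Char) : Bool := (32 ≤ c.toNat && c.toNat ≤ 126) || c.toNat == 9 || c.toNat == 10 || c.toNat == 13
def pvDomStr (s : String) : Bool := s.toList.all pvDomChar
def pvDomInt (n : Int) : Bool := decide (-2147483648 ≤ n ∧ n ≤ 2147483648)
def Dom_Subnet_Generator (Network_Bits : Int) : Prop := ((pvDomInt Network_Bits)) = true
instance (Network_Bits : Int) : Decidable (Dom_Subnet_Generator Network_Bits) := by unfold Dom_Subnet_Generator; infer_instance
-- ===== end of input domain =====

-- B replaces A's bit-by-bit while loop by the closed form 256 - 2^(8-rem) (objective: simpler).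

-- ===== PORT A =====
-- The while loop runs with Network_Bits = Network_Bits % 8 ∈ [0,8), decrementing to 0,
-- so it is exactly this recursion on the Nat value of that remainder; Limit stays ≥ 1
-- during the loop body, so Python's 2**Limit is 2^limit.toNat exactly.
def sgLoop : Nat → Int → Int → Int
  | 0, _, s => s
  | n + 1, limit, s => sgLoop n (limit - 1) (s + 2 ^ limit.toNat)

def Subnet_Generator (Network_Bits : Int) : List Int :=
  let host_Bits := 32 - Network_Bits
  let host_Octates := PySem.Int.floordiv host_Bits 8
  let net_Octates := PySem.Int.floordiv Network_Bits 8
  let nb := PySem.Int.mod Network_Bits 8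
  let build : List Int := [] ++ PySem.List.pyRepeat [255] net_Octates
  let build := if nb ≠ 0 then build ++ [sgLoop nb.toNat 7 0] else build
  build ++ PySem.List.pyRepeat [0] host_Octates

-- ===== PORT B =====
def Subnet_Generator_alt (Network_Bits : Int) : List Int :=
  let rem := PySem.Int.mod Network_Bits 8
  let mid : List Int := if rem = 0 then [] else [256 - 2 ^ (8 - rem).toNat]
  PySem.List.pyRepeat [255] (PySem.Int.floordiv Network_Bits 8) ++ mid
    ++ PySem.List.pyRepeat [0] (PySem.Int.floordiv (32 - Network_Bits) 8)

-- ===== PRECONDITION & SPEC =====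
def Spec_Subnet_Generator (Network_Bits : Int) (out : List Int) : Prop := out = Subnet_Generator_alt Network_Bits
instance (Network_Bits : Int) (out : List Int) : Decidable (Spec_Subnet_Generator Network_Bits out) := by unfold Spec_Subnet_Generator; infer_instance

-- ===== CLAIM (what is proved, stated in full; the proofs are below) =====
def Claim_equal_Subnet_Generator : Prop := ∀ (Network_Bits : Int), Dom_Subnet_Generator Network_Bits → Spec_Subnet_Generator Network_Bits (Subnet_Generator Network_Bits)

-- ===== LEMMAS AND PROOFS =====
lemma sgLoop_closed (r : Int) (h0 : 0 ≤ r) (h8 : r < 8) (hne : r ≠ 0) :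
    sgLoop r.toNat 7 0 = 256 - 2 ^ (8 - r).toNat := by
  interval_cases r <;> first | exact absurd rfl hne | decide

-- ===== VERDICT (by name: the statement is the Claim_ definition above) =====
theorem Subnet_Generator_spec : Claim_equal_Subnet_Generator := by
  intro NB _
  unfold Spec_Subnet_Generator Subnet_Generator Subnet_Generator_alt
  have h0 : 0 ≤ PySem.Int.mod NB 8 := PySem.Int.mod_nonneg NB (by norm_num)
  have h8 : PySem.Int.mod NB 8 < 8 := PySem.Int.mod_lt NB (by norm_num)
  by_cases h : PySem.Int.mod NB 8 = 0
  · have hd : (8:Int) ∣ NB := (PySem.Int.mod_eq_zero_iff_dvd NB 8).mp h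
    simp [hd]
  · simp only [h, if_neg, ne_eq, not_false_eq_true, if_true, List.nil_append,
      List.append_assoc, sgLoop_closed _ h0 h8 h]
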